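-- pv_equiv track=rewrite | github.com/sonofthomp/midi-harmonizer | utils.py | gen_cutoffs
-- ===== SOURCE A (Python) =====
-- def gen_cutoffs(note_times: list[list[int]]) -> tuple[list, dict, dict]:
-- 	"""Generates list of note cutoff times, dictionary mapping note cutoff times to
-- 	rounded note cutoff times, and dictionary mapping note cutoff times to note cutoff
-- 	indices
--
-- 	Args:
-- 		note_times (list[list[int]]): List of windows of time when notes are played (per
-- 									  track)
--
-- 	Returns:
-- 		tuple[list, dict, dict]: A list of note cutoff times, a dictionary mapping note
-- 								 cutoff times to rounded note cutoff times, and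
-- 								 dictionary mapping note cutoff times to note cutoff
-- 								 indices
-- 	"""
-- 	_cutoffs_set = set([
-- 		time
-- 		for note in note_times
-- 		for section in note
-- 		for time in section[:2]
-- 	])
-- 	cutoffs_list = list(_cutoffs_set)
-- 	cutoffs_list.sort()
--
-- 	cutoffs_map = {
-- 		cutoff: cutoff
-- 		for cutoff in cutoffs_list
-- 	}
--
-- 	index = 0
-- 	while index < (len(cutoffs_list) - 1):
-- 		a,b = cutoffs_list[index], cutoffs_list[index + 1]
-- 		if (b - a) < 200:
-- 			cutoffs_map[cutoffs_list[index + 1]] = cutoffs_list[index]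
-- 			del cutoffs_list[index + 1]
-- 		else:
-- 			index += 1
--
-- 	cutoffs_dict = {
-- 		time: index
-- 		for index, time in enumerate(cutoffs_list)
-- 	}
-- 	return (cutoffs_list, cutoffs_dict, cutoffs_map)
-- ===== SOURCE B (Python) =====
-- def gen_cutoffs(note_times):
-- 	"""One forward pass over the sorted distinct times with a running anchor."""
-- 	xs = sorted({
-- 		time
-- 		for note in note_times
-- 		for section in note
-- 		for time in section[:2]
-- 	})
-- 	anchors = []
-- 	cutoffs_map = {}
-- 	if xs:
-- 		anchor = xs[0]
-- 		for t in xs: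
-- 			if t - anchor < 200:
-- 				cutoffs_map[t] = anchor
-- 			else:
-- 				anchors.append(anchor)
-- 				anchor = t
-- 				cutoffs_map[t] = t
-- 		anchors.append(anchor)
-- 	cutoffs_dict = {a: i for i, a in enumerate(anchors)}
-- 	return (anchors, cutoffs_dict, cutoffs_map)
-- ===== Notes on version B (the rewrite author's own statement) =====
-- stated objective: alternative
-- what changed: A clusters the sorted distinct times by repeatedly deleting the next element from the list in place and pre-fills the cutoff map with every key before overwriting the merged ones; B makes one forward pass with a running anchor, building the surviving-anchors list and the cutoff map in a single sweep.
import Mathlib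
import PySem

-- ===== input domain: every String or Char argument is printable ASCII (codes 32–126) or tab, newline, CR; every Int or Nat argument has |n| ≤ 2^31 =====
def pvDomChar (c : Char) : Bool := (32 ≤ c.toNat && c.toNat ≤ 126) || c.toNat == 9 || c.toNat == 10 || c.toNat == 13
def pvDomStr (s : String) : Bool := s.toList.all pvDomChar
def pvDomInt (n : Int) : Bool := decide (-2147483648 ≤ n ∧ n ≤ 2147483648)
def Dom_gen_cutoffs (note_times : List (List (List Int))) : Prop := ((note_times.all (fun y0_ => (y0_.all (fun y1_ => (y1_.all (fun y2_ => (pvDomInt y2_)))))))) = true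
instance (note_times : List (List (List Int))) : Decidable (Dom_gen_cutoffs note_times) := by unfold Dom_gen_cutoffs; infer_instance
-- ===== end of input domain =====

-- B replaces A's delete-in-place clustering loop (which pre-fills the map and then
-- overwrites merged keys) by one forward pass with a running anchor over the sorted
-- distinct times, building the anchors list and the map in a single sweep (objective: alternative).

-- ===== PORT A =====

-- the set comprehension: all times of section[:2], in comprehension order, deduplicated
def pvFlat (note_times : List (List (List Int))) : List Int :=
  note_times.flatMap (fun note => note.flatMap (fun s => PySem.List.slice s none (some 2)))

-- the while-loop: 'while index < len(lst) - 1: a,b = lst[index], lst[index+1]; …'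
def pvLoopA (lst : List Int) (m : PySem.Dict Int Int) (index : Nat) :
    List Int × PySem.Dict Int Int :=
  if _h : index < lst.length - 1 then
    let a := PySem.List.pyGetD lst (index : Int) 0
    let b := PySem.List.pyGetD lst ((index : Int) + 1) 0
    if b - a < 200 then
      pvLoopA (lst.eraseIdx (index + 1)) (m.insert b a) index   -- del lst[index+1]
    else
      pvLoopA lst m (index + 1)
  else (lst, m)
termination_by lst.length - index
decreasing_by
  · have := List.length_eraseIdx_of_lt (l := lst) (i := index + 1) (by omega)
    omega
  · omega

def gen_cutoffs (note_times : List (List (List Int))) : List Int × (List (Int × Int)) × (List (Int × Int)) :=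
  let cutoffs_list := PySem.List.sorted (PySem.Set.ofList (pvFlat note_times)) (fun x => x) false
  let cutoffs_map := cutoffs_list.foldl (fun d c => d.insert c c) PySem.Dict.empty
  let r := pvLoopA cutoffs_list cutoffs_map 0
  let cutoffs_dict := (PySem.List.enumerate r.1 0).foldl (fun d p => d.insert p.2 p.1) PySem.Dict.empty
  (r.1, cutoffs_dict.items, r.2.items)

-- ===== PORT B =====

-- B's single pass: fold over the sorted distinct times carrying (anchors, map, anchor)
def pvStepB (st : List Int × PySem.Dict Int Int × Int) (t : Int) :
    List Int × PySem.Dict Int Int × Int :=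
  if t - st.2.2 < 200 then (st.1, st.2.1.insert t st.2.2, st.2.2)
  else (st.1 ++ [st.2.2], st.2.1.insert t t, t)

def gen_cutoffs_alt (note_times : List (List (List Int))) : List Int × (List (Int × Int)) × (List (Int × Int)) :=
  let xs := PySem.List.sorted
    (PySem.Set.ofList (note_times.flatMap (fun note => note.flatMap (fun s => PySem.List.slice s none (some 2)))))
    (fun x => x) false
  let p : List Int × PySem.Dict Int Int :=
    match xs with
    | [] => ([], PySem.Dict.empty)
    | x0 :: _ =>
      let st := xs.foldl pvStepB ([], PySem.Dict.empty, x0)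
      (st.1 ++ [st.2.2], st.2.1)
  let cutoffs_dict := (PySem.List.enumerate p.1 0).foldl (fun d q => d.insert q.2 q.1) PySem.Dict.empty
  (p.1, cutoffs_dict.items, p.2.items)

-- ===== PRECONDITION & SPEC =====
def Spec_gen_cutoffs (note_times : List (List (List Int))) (out : List Int × (List (Int × Int)) × (List (Int × Int))) : Prop := out = gen_cutoffs_alt note_times
instance (note_times : List (List (List Int))) (out : List Int × (List (Int × Int)) × (List (Int × Int))) : Decidable (Spec_gen_cutoffs note_times out) := by unfold Spec_gen_cutoffs; infer_instance

-- ===== CLAIM (what is proved, stated in full; the proofs are below) =====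
def Claim_equal_gen_cutoffs : Prop := ∀ (note_times : List (List (List Int))), Dom_gen_cutoffs note_times → Spec_gen_cutoffs note_times (gen_cutoffs note_times)

-- ===== LEMMAS AND PROOFS =====

-- cluster heads of a::rest (the surviving list entries)
def clHeads (a : Int) : List Int → List Int
  | [] => [a]
  | b :: r => if b - a < 200 then clHeads a r else a :: clHeads b r

-- the overwrites A's loop performs, applied to a starting dict
def clIns (a : Int) : List Int → PySem.Dict Int Int → PySem.Dict Int Int
  | [], m => m
  | b :: r, m => if b - a < 200 then clIns a r (m.insert b a) else clIns b r m

-- the inserts B's pass performs on the tail, applied to a starting dict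
def bIns (a : Int) : List Int → PySem.Dict Int Int → PySem.Dict Int Int
  | [], m => m
  | b :: r, m => if b - a < 200 then bIns a r (m.insert b a) else bIns b r (m.insert b b)

theorem loopA_eq (rest : List Int) : ∀ (done : List Int) (a : Int) (m : PySem.Dict Int Int),
    pvLoopA (done ++ a :: rest) m done.length = (done ++ clHeads a rest, clIns a rest m) := by
  induction rest with
  | nil =>
    intro done a m
    simp [pvLoopA, clHeads, clIns]
  | cons b r ih =>
    intro done a m
    rw [pvLoopA]
    have hlen : done.length < (done ++ a :: b :: r).length - 1 := by
      simp only [List.length_append, List.length_cons]; omega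
    have ha : PySem.List.pyGetD (done ++ a :: b :: r) (done.length : Int) 0 = a := by
      simp [PySem.List.pyGetD_natCast, List.getD]
    have hb : PySem.List.pyGetD (done ++ a :: b :: r) ((done.length : Int) + 1) 0 = b := by
      have hcast : ((done.length : Int) + 1) = ((done.length + 1 : Nat) : Int) := by push_cast; ring
      rw [hcast, PySem.List.pyGetD_natCast]
      unfold List.getD
      rw [List.getElem?_append_right (by omega)]
      simp
    rw [ha, hb]
    simp only [hlen, dif_pos]
    by_cases hc : b - a < 200
    · have herase : (done ++ a :: b :: r).eraseIdx (done.length + 1) = done ++ a :: r := by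
        have : done ++ a :: b :: r = (done ++ [a]) ++ b :: r := by simp
        rw [this, List.eraseIdx_append_of_length_le (by simp)]
        simp
      simp only [hc, if_pos, herase]
      rw [ih done a (m.insert b a)]
      simp [clHeads, clIns, hc]
    · simp only [hc, if_false]
      have h1 : done ++ a :: b :: r = (done ++ [a]) ++ b :: r := by simp
      have h2 : done.length + 1 = (done ++ [a]).length := by simp
      rw [h1, h2, ih (done ++ [a]) b m]
      simp [clHeads, clIns, hc]

theorem foldB_eq (rest : List Int) : ∀ (acc : List Int) (m : PySem.Dict Int Int) (anchor : Int),
    (rest.foldl pvStepB (acc, m, anchor)).1 ++ [(rest.foldl pvStepB (acc, m, anchor)).2.2]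
        = acc ++ clHeads anchor rest
    ∧ (rest.foldl pvStepB (acc, m, anchor)).2.1 = bIns anchor rest m := by
  induction rest with
  | nil => intro acc m anchor; simp [clHeads, bIns]
  | cons b r ih =>
    intro acc m anchor
    by_cases hc : b - anchor < 200
    · simpa [pvStepB, hc, clHeads, bIns] using ih acc (m.insert b anchor) anchor
    · have := ih (acc ++ [anchor]) (m.insert b b) b
      simpa [pvStepB, hc, clHeads, bIns] using this

-- inserting at a key already present commutes with any insert at a different key
theorem insert_overwrite_comm (d : PySem.Dict Int Int) (b c a w : Int)
    (hb : d.contains b = true) (hne : c ≠ b) :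
    (d.insert c w).insert b a = (d.insert b a).insert c w := by
  apply PySem.Dict.ext
  by_cases hcc : d.contains c = true
  · have hb' : (d.insert c w).contains b = true := by
      rw [PySem.Dict.contains_insert]; simp [hb]
    have hc' : (d.insert b a).contains c = true := by
      rw [PySem.Dict.contains_insert]; simp [hcc]
    rw [PySem.Dict.items_insert_of_contains _ _ hb', PySem.Dict.items_insert_of_contains _ _ hcc,
        PySem.Dict.items_insert_of_contains _ _ hc', PySem.Dict.items_insert_of_contains _ _ hb]
    rw [List.map_map, List.map_map]
    apply List.map_congr_left
    intro p _
    by_cases h1 : p.1 = b <;> by_cases h2 : p.1 = c <;>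
      simp_all [beq_iff_eq]
  · have hcc' : d.contains c = false := by simp_all
    have hb' : (d.insert c w).contains b = true := by
      rw [PySem.Dict.contains_insert]; simp [hb]
    have hc' : (d.insert b a).contains c = false := by
      rw [PySem.Dict.contains_insert]; simp [hcc', hne]
    rw [PySem.Dict.items_insert_of_contains _ _ hb', PySem.Dict.items_insert_of_not_contains _ _ hcc',
        PySem.Dict.items_insert_of_not_contains _ _ hc', PySem.Dict.items_insert_of_contains _ _ hb]
    rw [List.map_append]
    congr 1
    simp [beq_iff_eq, hne]

-- the self-insert fold over keys not containing b commutes with an overwrite at b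
theorem foldl_insself_insert (r : List Int) : ∀ (d : PySem.Dict Int Int) (b a : Int),
    d.contains b = true → b ∉ r →
    (r.foldl (fun d c => d.insert c c) d).insert b a
      = r.foldl (fun d c => d.insert c c) (d.insert b a) := by
  induction r with
  | nil => intro d b a _ _; rfl
  | cons c r ih =>
    intro d b a hb hnot
    simp only [List.mem_cons, not_or] at hnot
    simp only [List.foldl_cons]
    rw [ih (d.insert c c) b a (by rw [PySem.Dict.contains_insert]; simp [hb]) (by simp_all)]
    rw [insert_overwrite_comm d b c a c hb (fun h => hnot.1 h.symm)]

-- A's "insert everything, then overwrite merged keys" equals B's "insert each key once"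
theorem ins_eq (rest : List Int) : ∀ (a : Int) (m : PySem.Dict Int Int), rest.Nodup →
    clIns a rest (rest.foldl (fun d c => d.insert c c) m) = bIns a rest m := by
  induction rest with
  | nil => intro a m _; rfl
  | cons b r ih =>
    intro a m hnd
    simp only [List.nodup_cons] at hnd
    simp only [List.foldl_cons, clIns, bIns]
    by_cases hc : b - a < 200
    · simp only [hc, if_pos]
      rw [foldl_insself_insert r (m.insert b b) b a (PySem.Dict.contains_insert_self _ _ _) hnd.1,
          PySem.Dict.insert_insert_self]
      exact ih a (m.insert b a) hnd.2
    · simp only [hc, if_false]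
      exact ih b (m.insert b b) hnd.2

-- ===== VERDICT (by name: the statement is the Claim_ definition above) =====
theorem gen_cutoffs_spec : Claim_equal_gen_cutoffs := by
  intro note_times _
  unfold Spec_gen_cutoffs gen_cutoffs gen_cutoffs_alt pvFlat
  cases hxs : PySem.List.sorted
      (PySem.Set.ofList (note_times.flatMap (fun note => note.flatMap (fun s => PySem.List.slice s none (some 2)))))
      (fun x => x) false with
  | nil =>
    simp only []
    rw [pvLoopA]
    simp
  | cons a rest =>
    have hsorted := PySem.List.sorted_ofList_pairwise_lt
      (xs := note_times.flatMap (fun note => note.flatMap (fun s => PySem.List.slice s none (some 2))))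
    rw [hxs] at hsorted
    have hnd : rest.Nodup := by
      have := hsorted.sublist (List.sublist_cons_self a rest)
      exact this.imp (fun h => ne_of_lt h)
    simp only []
    have hA := loopA_eq rest [] a ((a :: rest).foldl (fun d c => d.insert c c) PySem.Dict.empty)
    simp only [List.nil_append, List.length_nil] at hA
    rw [hA]
    have hstep : pvStepB ([], PySem.Dict.empty, a) a
        = ([], PySem.Dict.empty.insert a a, a) := by
      simp [pvStepB]
    obtain ⟨hBlist, hBmap⟩ := foldB_eq rest [] (PySem.Dict.empty.insert a a) a
    simp only [List.nil_append] at hBlist hBmap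
    simp only [List.foldl_cons] at ⊢
    rw [hstep, hBlist, hBmap, ins_eq rest a (PySem.Dict.empty.insert a a) hnd]
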